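-- pv_equiv track=rewrite | github.com/xuefzhao/HGSV_SV_integration_pipe | scripts/step1.standardize_vcfs_to_bed.py | stat_list_to_hash_2
-- ===== SOURCE A (Python) =====
-- def stat_list_to_hash_2(bashir_stat_2):
-- 	out={}
-- 	for k1 in bashir_stat_2.keys():
-- 		for k2 in bashir_stat_2[k1].keys():
-- 			if not k2 in out.keys():
-- 				out[k2]={}
-- 			for k3 in bashir_stat_2[k1][k2].keys():
-- 				if not k3 in out[k2].keys():
-- 					out[k2][k3]={}
-- 				for k4 in bashir_stat_2[k1][k2][k3]:
-- 					if not k4 in out[k2][k3].keys():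
-- 						out[k2][k3][k4]=1
-- 					else:
-- 						out[k2][k3][k4]+=1
-- 	return out
-- ===== SOURCE B (Python) =====
-- def _merge(acc, d, depth):
--     # recursively merge one nested dict into the accumulator; at depth 0 count keys
--     if depth == 0:
--         for k in d:
--             acc[k] = acc.get(k, 0) + 1
--     else:
--         for k, v in d.items():
--             _merge(acc.setdefault(k, {}), v, depth - 1)
--
--
-- def stat_list_to_hash_2(bashir_stat_2):
--     out = {}
--     for d in bashir_stat_2.values():
--         _merge(out, d, 2)
--     return out
-- ===== Notes on version B (the rewrite author's own statement) =====
-- stated objective: simpler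
-- what changed: Replaces the four-level in-place nested-loop aggregation with a single generic recursive merge helper that folds each per-sample nested dict into the accumulator by structural recursion on depth, counting at the leaves.
import Mathlib
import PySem

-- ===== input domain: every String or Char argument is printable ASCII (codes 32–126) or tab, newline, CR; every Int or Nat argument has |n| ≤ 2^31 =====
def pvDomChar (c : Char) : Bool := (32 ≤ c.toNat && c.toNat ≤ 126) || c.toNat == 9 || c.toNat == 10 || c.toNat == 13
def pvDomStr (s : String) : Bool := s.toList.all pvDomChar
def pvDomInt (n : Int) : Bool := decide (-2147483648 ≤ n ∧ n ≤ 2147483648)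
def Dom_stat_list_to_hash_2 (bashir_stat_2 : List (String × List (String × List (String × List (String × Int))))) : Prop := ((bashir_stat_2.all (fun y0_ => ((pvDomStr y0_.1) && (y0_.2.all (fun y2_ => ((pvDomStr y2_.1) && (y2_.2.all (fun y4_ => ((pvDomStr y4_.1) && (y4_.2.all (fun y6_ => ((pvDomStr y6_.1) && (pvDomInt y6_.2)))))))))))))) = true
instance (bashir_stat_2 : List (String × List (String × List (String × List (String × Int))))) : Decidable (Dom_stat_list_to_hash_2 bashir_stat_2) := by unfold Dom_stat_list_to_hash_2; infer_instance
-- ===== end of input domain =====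

-- B replaces A's four-level in-place nested-loop aggregation by a generic recursive merge
-- of each per-sample nested dict into the accumulator (objective: simpler); same values.


-- Nested-dict types shared by both ports (dict[str, dict[str, dict[str, int]]]).
abbrev pvN3 := PySem.Dict String Int
abbrev pvN2 := PySem.Dict String pvN3
abbrev pvN1 := PySem.Dict String pvN2

-- Representation plumbing shared by both ports: the nested Dict rendered as the
-- association-list return type of the convention.
def pvToOut (out : pvN1) : List (String × List (String × List (String × Int))) :=
  out.items.map (fun p => (p.1, p.2.items.map (fun q => (q.1, q.2.items))))

-- ===== PORT A =====
-- A's Python iterates 'for k in d.keys()' and immediately indexes 'd[k]'; since dict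
-- keys are unique this is iteration over the items, ported as folds over the pairs.
-- Each of A's loops is one named fold; bodies keep A's branch order and values.

-- innermost loop: 'for k4 in bashir_stat_2[k1][k2][k3]: if not k4 in out[k2][k3] …'
def pvALoop4 (k2 k3 : String) (xs : List (String × Int)) (out : pvN1) : pvN1 :=
  xs.foldl (fun out p4 =>
    let d2 := out.getD k2 PySem.Dict.empty
    let d3 := d2.getD k3 PySem.Dict.empty
    let d3' := if d3.contains p4.1 = false then d3.insert p4.1 1
               else d3.insert p4.1 (d3.getD p4.1 0 + 1)
    out.insert k2 (d2.insert k3 d3')) out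

-- 'for k3 in …: if not k3 in out[k2]: out[k2][k3]={}; <k4 loop>'
def pvALoop3 (k2 : String) (v2 : List (String × List (String × Int))) (out : pvN1) : pvN1 :=
  v2.foldl (fun out p3 =>
    let d2 := out.getD k2 PySem.Dict.empty
    let d2' := if d2.contains p3.1 = false then d2.insert p3.1 PySem.Dict.empty else d2
    pvALoop4 k2 p3.1 p3.2 (out.insert k2 d2')) out

-- 'for k2 in …: if not k2 in out: out[k2]={}; <k3 loop>'
def pvALoop2 (v1 : List (String × List (String × List (String × Int)))) (out : pvN1) : pvN1 :=
  v1.foldl (fun out p2 =>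
    let out' := if out.contains p2.1 = false then out.insert p2.1 PySem.Dict.empty else out
    pvALoop3 p2.1 p2.2 out') out

def stat_list_to_hash_2 (bashir_stat_2 : List (String × List (String × List (String × List (String × Int))))) : List (String × List (String × List (String × Int))) :=
  pvToOut (bashir_stat_2.foldl (fun out p1 => pvALoop2 p1.2 out) PySem.Dict.empty)

-- ===== PORT B =====
-- Source B's depth-polymorphic helper _merge(acc, d, depth) is ported as one function per
-- depth (the accumulator type differs by level); each is a step-for-step transcription
-- of the corresponding specialisation. Python's 'acc.setdefault(k, {})' followed by
-- recursive in-place mutation is rendered as getD + reinsert (same order and values).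

-- _merge at depth 0: 'for k in d: acc[k] = acc.get(k, 0) + 1'
def pvMerge0 (acc : pvN3) (d : List (String × Int)) : pvN3 :=
  d.foldl (fun acc p => acc.insert p.1 (acc.getD p.1 0 + 1)) acc

-- _merge at depth 1: 'for k, v in d.items(): _merge(acc.setdefault(k, {}), v, 0)'
def pvMerge1 (acc : pvN2) (d : List (String × List (String × Int))) : pvN2 :=
  d.foldl (fun acc p => acc.insert p.1 (pvMerge0 (acc.getD p.1 PySem.Dict.empty) p.2)) acc

-- _merge at depth 2: 'for k, v in d.items(): _merge(acc.setdefault(k, {}), v, 1)'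
def pvMerge2 (acc : pvN1) (d : List (String × List (String × List (String × Int)))) : pvN1 :=
  d.foldl (fun acc p => acc.insert p.1 (pvMerge1 (acc.getD p.1 PySem.Dict.empty) p.2)) acc

def stat_list_to_hash_2_alt (bashir_stat_2 : List (String × List (String × List (String × List (String × Int))))) : List (String × List (String × List (String × Int))) :=
  pvToOut (bashir_stat_2.foldl (fun out p1 => pvMerge2 out p1.2) PySem.Dict.empty)

-- ===== PRECONDITION & SPEC =====
def Spec_stat_list_to_hash_2 (bashir_stat_2 : List (String × List (String × List (String × List (String × Int))))) (out : List (String × List (String × List (String × Int)))) : Prop := out = stat_list_to_hash_2_alt bashir_stat_2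
instance (bashir_stat_2 : List (String × List (String × List (String × List (String × Int))))) (out : List (String × List (String × List (String × Int)))) : Decidable (Spec_stat_list_to_hash_2 bashir_stat_2 out) := by unfold Spec_stat_list_to_hash_2; infer_instance

-- ===== CLAIM (what is proved, stated in full; the proofs are below) =====
def Claim_equal_stat_list_to_hash_2 : Prop := ∀ (bashir_stat_2 : List (String × List (String × List (String × List (String × Int))))), Dom_stat_list_to_hash_2 bashir_stat_2 → Spec_stat_list_to_hash_2 bashir_stat_2 (stat_list_to_hash_2 bashir_stat_2)

-- ===== LEMMAS AND PROOFS =====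

-- the accumulator invariant: unique keys at the two outer levels
def pvInv (out : pvN1) : Prop :=
  out.keys.Nodup ∧ ∀ p ∈ out.items, p.2.keys.Nodup

-- inserting the value a key already has (keys unique) is the identity
theorem pv_insert_get?_self {κ ν : Type} [BEq κ] [LawfulBEq κ] (d : PySem.Dict κ ν)
    (k : κ) (v : ν) (hnd : d.keys.Nodup) (h : d.get? k = some v) : d.insert k v = d := by
  have hc : d.contains k = true := by
    rw [PySem.Dict.contains_eq_isSome_get?, h]; rfl
  apply PySem.Dict.ext
  rw [PySem.Dict.items_insert_of_contains _ _ hc]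
  conv_rhs => rw [← List.map_id d.items]
  apply List.map_congr_left
  intro p hp
  by_cases hk : p.1 = k
  · have h2 : d.get? p.1 = some p.2 := PySem.Dict.get?_of_mem_items d (by simpa using hp) hnd
    rw [hk, h] at h2
    have : p = (k, v) := by
      obtain ⟨a, b⟩ := p
      simp only at hk h2 ⊢
      exact Prod.ext hk (Option.some_inj.mp h2).symm
    simp [this]
  · simp [hk]

theorem pvALoop4_eq (xs : List (String × Int)) (k2 k3 : String) (out : pvN1)
    (d2 : pvN2) (d3 : pvN3)
    (h1 : out.get? k2 = some d2) (h2 : d2.get? k3 = some d3)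
    (hnd1 : out.keys.Nodup) (hnd2 : d2.keys.Nodup) :
    pvALoop4 k2 k3 xs out = out.insert k2 (d2.insert k3 (pvMerge0 d3 xs)) := by
  induction xs generalizing out d2 d3 with
  | nil =>
    simp only [pvALoop4, pvMerge0, List.foldl_nil]
    rw [pv_insert_get?_self d2 k3 d3 hnd2 h2, pv_insert_get?_self out k2 d2 hnd1 h1]
  | cons p xs ih =>
    have hbody : pvALoop4 k2 k3 (p :: xs) out
        = pvALoop4 k2 k3 xs (out.insert k2 (d2.insert k3 (d3.insert p.1 (d3.getD p.1 0 + 1)))) := by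
      simp only [pvALoop4, List.foldl_cons]
      rw [PySem.Dict.getD_of_get?_eq_some _ _ h1, PySem.Dict.getD_of_get?_eq_some _ _ h2]
      by_cases hc : d3.contains p.1 = false
      · rw [if_pos hc, PySem.Dict.getD_of_not_contains _ _ hc]
        norm_num
      · rw [if_neg hc]
    rw [hbody, ih _ _ _ (PySem.Dict.get?_insert_self _ _ _) (PySem.Dict.get?_insert_self _ _ _)
        (PySem.Dict.nodup_keys_insert _ _ _ hnd1) (PySem.Dict.nodup_keys_insert _ _ _ hnd2),
      PySem.Dict.insert_insert_self, PySem.Dict.insert_insert_self]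
    simp only [pvMerge0, List.foldl_cons]

theorem pvALoop3_eq (v2 : List (String × List (String × Int))) (k2 : String) (out : pvN1)
    (d2 : pvN2) (h1 : out.get? k2 = some d2) (hnd1 : out.keys.Nodup) (hnd2 : d2.keys.Nodup) :
    pvALoop3 k2 v2 out = out.insert k2 (pvMerge1 d2 v2) := by
  induction v2 generalizing out d2 with
  | nil =>
    simp only [pvALoop3, pvMerge1, List.foldl_nil]
    rw [pv_insert_get?_self out k2 d2 hnd1 h1]
  | cons p v2 ih =>
    set d2' := (if d2.contains p.1 = false then d2.insert p.1 PySem.Dict.empty else d2) with hd2'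
    have hone : pvALoop3 k2 (p :: v2) out
        = pvALoop3 k2 v2 (pvALoop4 k2 p.1 p.2 (out.insert k2 d2')) := by
      simp only [pvALoop3, List.foldl_cons]
      rw [PySem.Dict.getD_of_get?_eq_some _ _ h1]
    have hg : d2'.get? p.1 = some (d2.getD p.1 PySem.Dict.empty) := by
      by_cases hc : d2.contains p.1 = false
      · rw [hd2', if_pos hc, PySem.Dict.get?_insert_self, PySem.Dict.getD_of_not_contains _ _ hc]
      · rw [hd2', if_neg hc]
        have hs : (d2.get? p.1).isSome := by
          rw [← PySem.Dict.contains_eq_isSome_get?]; simpa using hc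
        obtain ⟨w, hw⟩ := Option.isSome_iff_exists.mp hs
        rw [hw, PySem.Dict.getD_of_get?_eq_some _ _ hw]
    have hnd2' : d2'.keys.Nodup := by
      by_cases hc : d2.contains p.1 = false
      · rw [hd2', if_pos hc]; exact PySem.Dict.nodup_keys_insert _ _ _ hnd2
      · rw [hd2', if_neg hc]; exact hnd2
    rw [hone, pvALoop4_eq _ _ _ _ _ _ (PySem.Dict.get?_insert_self _ _ _) hg
        (PySem.Dict.nodup_keys_insert _ _ _ hnd1) hnd2', PySem.Dict.insert_insert_self]
    have hcollapse : d2'.insert p.1 (pvMerge0 (d2.getD p.1 PySem.Dict.empty) p.2)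
        = d2.insert p.1 (pvMerge0 (d2.getD p.1 PySem.Dict.empty) p.2) := by
      by_cases hc : d2.contains p.1 = false
      · rw [hd2', if_pos hc, PySem.Dict.insert_insert_self]
      · rw [hd2', if_neg hc]
    rw [hcollapse, ih _ _ (PySem.Dict.get?_insert_self _ _ _)
        (PySem.Dict.nodup_keys_insert _ _ _ hnd1) (PySem.Dict.nodup_keys_insert _ _ _ hnd2),
      PySem.Dict.insert_insert_self]
    simp only [pvMerge1, List.foldl_cons]

theorem pv_getD_keys_nodup (out : pvN1) (k : String) (h : pvInv out) :
    (out.getD k PySem.Dict.empty).keys.Nodup := by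
  rcases hs : out.get? k with _ | w
  · rw [PySem.Dict.getD_eq_get?_getD, hs]
    exact PySem.Dict.nodup_keys_empty
  · rw [PySem.Dict.getD_of_get?_eq_some _ _ hs]
    exact h.2 (k, w) (PySem.Dict.mem_items_of_get?_eq_some _ hs)

theorem pvMerge1_nodup (d2 : pvN2) (v : List (String × List (String × Int)))
    (h : d2.keys.Nodup) : (pvMerge1 d2 v).keys.Nodup := by
  unfold pvMerge1
  exact PySem.Dict.nodup_keys_foldl_insert_key v (fun p => p.1)
    (fun d p => pvMerge0 (d.getD p.1 PySem.Dict.empty) p.2) d2 h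

theorem pvInv_insert (out : pvN1) (k : String) (v : pvN2)
    (h : pvInv out) (hv : v.keys.Nodup) : pvInv (out.insert k v) := by
  refine ⟨PySem.Dict.nodup_keys_insert _ _ _ h.1, ?_⟩
  intro p hp
  rcases (PySem.Dict.mem_items_insert _ _ _ _).mp hp with h' | ⟨h', _⟩
  · rw [h']; exact hv
  · exact h.2 p h'

theorem pv_inv_merge2 (v1 : List (String × List (String × List (String × Int)))) (out : pvN1)
    (h : pvInv out) : pvInv (pvMerge2 out v1) := by
  induction v1 generalizing out with
  | nil => exact h
  | cons p v1 ih =>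
    have : pvMerge2 out (p :: v1)
        = pvMerge2 (out.insert p.1 (pvMerge1 (out.getD p.1 PySem.Dict.empty) p.2)) v1 := by
      simp only [pvMerge2, List.foldl_cons]
    rw [this]
    exact ih _ (pvInv_insert _ _ _ h (pvMerge1_nodup _ _ (pv_getD_keys_nodup out p.1 h)))

theorem pvALoop2_eq (v1 : List (String × List (String × List (String × Int)))) (out : pvN1)
    (h : pvInv out) : pvALoop2 v1 out = pvMerge2 out v1 := by
  induction v1 generalizing out with
  | nil => rfl
  | cons p v1 ih =>
    set out' := (if out.contains p.1 = false then out.insert p.1 PySem.Dict.empty else out)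
      with hout'
    have hone : pvALoop2 (p :: v1) out = pvALoop2 v1 (pvALoop3 p.1 p.2 out') := by
      simp only [pvALoop2, List.foldl_cons]
      rfl
    have hg : out'.get? p.1 = some (out.getD p.1 PySem.Dict.empty) := by
      by_cases hc : out.contains p.1 = false
      · rw [hout', if_pos hc, PySem.Dict.get?_insert_self, PySem.Dict.getD_of_not_contains _ _ hc]
      · rw [hout', if_neg hc]
        have hs : (out.get? p.1).isSome := by
          rw [← PySem.Dict.contains_eq_isSome_get?]; simpa using hc
        obtain ⟨w, hw⟩ := Option.isSome_iff_exists.mp hs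
        rw [hw, PySem.Dict.getD_of_get?_eq_some _ _ hw]
    have hnd' : out'.keys.Nodup := by
      by_cases hc : out.contains p.1 = false
      · rw [hout', if_pos hc]; exact PySem.Dict.nodup_keys_insert _ _ _ h.1
      · rw [hout', if_neg hc]; exact h.1
    rw [hone, pvALoop3_eq _ _ _ _ hg hnd' (pv_getD_keys_nodup out p.1 h)]
    have hcollapse : out'.insert p.1 (pvMerge1 (out.getD p.1 PySem.Dict.empty) p.2)
        = out.insert p.1 (pvMerge1 (out.getD p.1 PySem.Dict.empty) p.2) := by
      by_cases hc : out.contains p.1 = false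
      · rw [hout', if_pos hc, PySem.Dict.insert_insert_self]
      · rw [hout', if_neg hc]
    rw [hcollapse, ih _ (pvInv_insert _ _ _ h (pvMerge1_nodup _ _ (pv_getD_keys_nodup out p.1 h)))]
    simp only [pvMerge2, List.foldl_cons]

-- ===== VERDICT (by name: the statement is the Claim_ definition above) =====
theorem stat_list_to_hash_2_spec : Claim_equal_stat_list_to_hash_2 := by
  intro bs _
  unfold Spec_stat_list_to_hash_2 stat_list_to_hash_2 stat_list_to_hash_2_alt
  have main : ∀ (l : List (String × List (String × List (String × List (String × Int))))) (out : pvN1),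
      pvInv out → l.foldl (fun out p1 => pvALoop2 p1.2 out) out
        = l.foldl (fun out p1 => pvMerge2 out p1.2) out := by
    intro l
    induction l with
    | nil => intro out _; rfl
    | cons p l ih =>
      intro out h
      simp only [List.foldl_cons]
      rw [pvALoop2_eq p.2 out h, ih _ (pv_inv_merge2 p.2 out h)]
  rw [main bs PySem.Dict.empty (by constructor <;> simp [PySem.Dict.empty, PySem.Dict.keys])]
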